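-- pv_equiv track=rewrite | github.com/80asv/coursera | Semana 3/listas/producto_mas_costoso.py | producto_mas_costoso
-- ===== SOURCE A (Python) =====
-- def producto_mas_costoso(carrito_compras: dict)->str:
--     if not carrito_compras:
--         return "No hay productos en el carrito"
--     flipped = {}
--     for key, value in carrito_compras.items():
--         if value not in flipped:
--             flipped[value] = [key]
--         else:
--             flipped[value].append(key)
--     cheap_prod = sorted(flipped[max(flipped.keys())])
--
--     return cheap_prod[0]
-- ===== SOURCE B (Python) =====
-- def producto_mas_costoso(carrito_compras: dict) -> str:
--     if not carrito_compras:
--         return "No hay productos en el carrito"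
--     max_price = max(carrito_compras.values())
--     return min(k for k, v in carrito_compras.items() if v == max_price)
-- ===== Notes on version B (the rewrite author's own statement) =====
-- stated objective: simpler
-- what changed: Replaces the inverted price->names dict plus sorting of the top bucket with two plain scans: max over the values, then min over the names priced at that max; no auxiliary structure.
import Mathlib
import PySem

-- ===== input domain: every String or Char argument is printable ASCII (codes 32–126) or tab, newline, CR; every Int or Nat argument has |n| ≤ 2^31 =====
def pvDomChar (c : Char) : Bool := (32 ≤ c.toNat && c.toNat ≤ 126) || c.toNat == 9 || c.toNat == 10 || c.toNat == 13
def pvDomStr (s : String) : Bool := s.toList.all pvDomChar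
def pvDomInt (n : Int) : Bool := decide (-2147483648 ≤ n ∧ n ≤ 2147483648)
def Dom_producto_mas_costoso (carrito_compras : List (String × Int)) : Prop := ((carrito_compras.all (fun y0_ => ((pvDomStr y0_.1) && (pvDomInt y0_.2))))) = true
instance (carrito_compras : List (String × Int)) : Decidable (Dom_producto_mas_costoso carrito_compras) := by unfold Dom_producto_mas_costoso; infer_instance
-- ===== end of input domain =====

-- B replaces A's inverted price->names dict and the sort of its top bucket by two plain
-- scans (max over the values, then min over the names at that max); objective: simpler.
-- The dict argument is marshalled as PySem.Dict.ofList (Python dict semantics for pairs).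

-- ===== PORT A =====
def producto_mas_costoso (carrito_compras : List (String × Int)) : String :=
  let d := PySem.Dict.ofList carrito_compras
  if d.items.isEmpty then "No hay productos en el carrito"
  else
    let flipped : PySem.Dict Int (List String) :=
      d.items.foldl (fun fl kv =>
        if fl.contains kv.2 then fl.modify kv.2 [] (fun b => b ++ [kv.1])
        else fl.insert kv.2 [kv.1]) PySem.Dict.empty
    match PySem.List.max? flipped.keys (fun y => y) with
    | none => ""   -- unreachable: the dict is nonempty, so flipped has a key
    | some mx =>
      let cheap_prod := PySem.List.sorted (flipped.getD mx []) (fun y => y)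
      (PySem.List.pyGet? cheap_prod 0).getD ""   -- index 0 always in range here

-- ===== PORT B =====
def producto_mas_costoso_alt (carrito_compras : List (String × Int)) : String :=
  let d := PySem.Dict.ofList carrito_compras
  if d.items.isEmpty then "No hay productos en el carrito"
  else
    match PySem.List.max? d.values (fun y => y) with
    | none => ""   -- unreachable: the dict is nonempty
    | some mx =>
      (PySem.List.min? ((d.items.filter (fun kv => kv.2 == mx)).map (fun kv => kv.1))
        (fun y => y)).getD ""   -- the filter is nonempty, so min? is some

-- ===== PRECONDITION & SPEC =====
def Spec_producto_mas_costoso (carrito_compras : List (String × Int)) (out : String) : Prop := out = producto_mas_costoso_alt carrito_compras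
instance (carrito_compras : List (String × Int)) (out : String) : Decidable (Spec_producto_mas_costoso carrito_compras out) := by unfold Spec_producto_mas_costoso; infer_instance

-- ===== CLAIM (what is proved, stated in full; the proofs are below) =====
def Claim_equal_producto_mas_costoso : Prop := ∀ (carrito_compras : List (String × Int)), Dom_producto_mas_costoso carrito_compras → Spec_producto_mas_costoso carrito_compras (producto_mas_costoso carrito_compras)

-- ===== LEMMAS AND PROOFS =====

-- max?/min? with the identity key only depend on the members of the list
theorem pv_max?_id_congr_mem (xs ys : List Int) (h : ∀ x, x ∈ xs ↔ x ∈ ys) :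
    PySem.List.max? xs (fun y => y) = PySem.List.max? ys (fun y => y) := by
  cases hx : PySem.List.max? xs (fun y => y) with
  | none =>
      cases hy : PySem.List.max? ys (fun y => y) with
      | none => rfl
      | some m =>
          have := PySem.List.max?_mem hy
          rw [PySem.List.max?_eq_none_iff] at hx
          exact absurd ((h m).mpr this) (by simp [hx])
  | some m =>
      cases hy : PySem.List.max? ys (fun y => y) with
      | none =>
          have := PySem.List.max?_mem hx
          rw [PySem.List.max?_eq_none_iff] at hy
          exact absurd ((h m).mp this) (by simp [hy])
      | some m' =>
          have h1 : m ≤ m' := PySem.List.max?_isMax hy m ((h m).mp (PySem.List.max?_mem hx))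
          have h2 : m' ≤ m := PySem.List.max?_isMax hx m' ((h m').mpr (PySem.List.max?_mem hy))
          exact congrArg some (le_antisymm h1 h2)

-- sorted(xs)[0] is min(xs) (identity key, String)
theorem pv_head_sorted_eq_min? (xs : List String) (m : String) (t : List String)
    (hs : PySem.List.sorted xs (fun y => y) = m :: t) :
    PySem.List.min? xs (fun y => y) = some m := by
  have hmem : m ∈ xs := by
    have := PySem.List.mem_sorted (x := m) (xs := xs) (key := fun y => y) (rev := false)
    rw [hs] at this; exact this.mp (List.mem_cons_self ..)
  cases hx : PySem.List.min? xs (fun y => y) with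
  | none =>
      rw [PySem.List.min?_eq_none_iff] at hx
      simp [hx] at hmem
  | some m' =>
      have h1 : m' ≤ m := PySem.List.min?_isMin hx m hmem
      have h2 : m ≤ m' := PySem.List.key_head_sorted_le xs (fun y => y) hs m' (PySem.List.min?_mem hx)
      exact congrArg some (le_antisymm h1 h2)

-- the core equality, over the items list of the marshalled dict
theorem pv_core (l : List (String × Int)) :
    (match PySem.List.max? (l.foldl (fun (fl : PySem.Dict Int (List String)) kv =>
        if fl.contains kv.2 then fl.modify kv.2 [] (fun b => b ++ [kv.1])
        else fl.insert kv.2 [kv.1]) PySem.Dict.empty).keys (fun y => y) with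
    | none => ""
    | some mx =>
      (PySem.List.pyGet? (PySem.List.sorted ((l.foldl (fun (fl : PySem.Dict Int (List String)) kv =>
        if fl.contains kv.2 then fl.modify kv.2 [] (fun b => b ++ [kv.1])
        else fl.insert kv.2 [kv.1]) PySem.Dict.empty).getD mx []) (fun y => y)) 0).getD "") =
    (match PySem.List.max? (l.map (fun (kv : String × Int) => kv.2)) (fun y => y) with
    | none => ""
    | some mx =>
      (PySem.List.min? ((l.filter (fun (kv : String × Int) => kv.2 == mx)).map
        (fun (kv : String × Int) => kv.1)) (fun y => y)).getD "") := by
  -- 1. the branching loop is the pure-modify loop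
  have hfold : l.foldl (fun fl kv =>
        if fl.contains kv.2 then fl.modify kv.2 [] (fun b => b ++ [kv.1])
        else fl.insert kv.2 [kv.1]) PySem.Dict.empty =
      l.foldl (fun (fl : PySem.Dict Int (List String)) kv =>
        fl.modify kv.2 [] (fun b => b ++ [kv.1])) PySem.Dict.empty := by
    apply PySem.List.foldl_congr_mem
    intro fl kv _
    by_cases hc : fl.contains kv.2
    · simp [hc]
    · simp only [Bool.not_eq_true] at hc
      simp [hc, PySem.Dict.modify, PySem.Dict.getD_of_not_contains]
  rw [hfold]
  -- 2. keys of the modify loop = set of the values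
  have hkeys : (l.foldl (fun (fl : PySem.Dict Int (List String)) kv =>
        fl.modify kv.2 [] (fun b => b ++ [kv.1])) PySem.Dict.empty).keys =
      PySem.Set.ofList (l.map (fun kv => kv.2)) := by
    rw [PySem.Dict.keys_foldl_modify_key l (fun kv => kv.2) [] (fun _ kv => fun b => b ++ [kv.1])]
    simp [PySem.Dict.keys_empty, PySem.Set.update_nil_left]
  rw [hkeys]
  rw [pv_max?_id_congr_mem _ (l.map (fun kv => kv.2))
    (fun x => PySem.Set.mem_ofList ..)]
  cases hmx : PySem.List.max? (l.map (fun kv => kv.2)) (fun y => y) with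
  | none => rfl
  | some mx =>
      -- 3. the top bucket is the filtered names, in order
      have hbucket : (l.foldl (fun (fl : PySem.Dict Int (List String)) kv =>
            fl.modify kv.2 [] (fun b => b ++ [kv.1])) PySem.Dict.empty).getD mx [] =
          (l.filter (fun kv => kv.2 == mx)).map (fun kv => kv.1) := by
        have hm : l.foldl (fun (fl : PySem.Dict Int (List String)) kv =>
              fl.modify kv.2 [] (fun b => b ++ [kv.1])) PySem.Dict.empty =
            (l.map (fun kv => (kv.2, kv.1))).foldl
              (fun (fl : PySem.Dict Int (List String)) p =>
                fl.modify p.1 [] (fun b => b ++ [p.2])) PySem.Dict.empty := by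
          rw [List.foldl_map]
        rw [hm, PySem.Dict.getD_foldl_modify_append]
        simp [List.filter_map, Function.comp_def]
      -- 4. sorted(names)[0] = min(names), names nonempty
      have hne : (l.filter (fun kv => kv.2 == mx)).map (fun kv => kv.1) ≠ [] := by
        have hmem := PySem.List.max?_mem hmx
        simp only [List.mem_map] at hmem
        obtain ⟨kv, hkv, hv⟩ := hmem
        simp only [ne_eq, List.map_eq_nil_iff, List.filter_eq_nil_iff, not_forall]
        exact ⟨kv, hkv, by simp [hv]⟩
      cases hs : PySem.List.sorted ((l.filter (fun (kv : String × Int) => kv.2 == mx)).map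
          (fun kv => kv.1)) (fun y => y) with
      | nil => exact absurd ((PySem.List.sorted_eq_nil_iff ..).mp hs) hne
      | cons m t =>
          simp only [hbucket, hs, pv_head_sorted_eq_min? _ m t hs, PySem.List.pyGet?, PySem.List.pyIdx?]
          simp

-- ===== VERDICT (by name: the statement is the Claim_ definition above) =====
theorem producto_mas_costoso_spec : Claim_equal_producto_mas_costoso := by
  intro c _
  unfold Spec_producto_mas_costoso producto_mas_costoso producto_mas_costoso_alt
  by_cases h : (PySem.Dict.ofList c).items.isEmpty
  · simp [h]
  · simp only [h, Bool.false_eq_true, if_false]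
    exact pv_core (PySem.Dict.ofList c).items
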